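-- pv_equiv track=rewrite | github.com/Geeks-of-little-importance/Algorithm | Week03/ReportResultReceive/ReportResultReceive_pr.py | solution
-- ===== SOURCE A (Python) =====
-- def solution(id_list, report, k):
--     report = list(set(report))
--     id_dict = {id: [] for id in id_list}
--     sin_dict = {id: 0 for id in id_list}
--
--     for r in report:
--         user, sin = r.split()
--         id_dict[user].append(sin)
--         sin_dict[sin] += 1
--
--     answer = [0 for i in range(len(id_list))]
--     for i in range(len(id_list)):
--         for iv in id_dict[id_list[i]]:
--             if sin_dict[iv] >= k:
--                 answer[i] += 1
--
--     return answer
-- ===== SOURCE B (Python) =====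
-- def solution(id_list, report, k):
--     # group deduped reports by reported user: reported -> list of reporters
--     reporters = {}
--     for r in set(report):
--         parts = r.split()
--         reporters.setdefault(parts[1], []).append(parts[0])
--     # count, per reporter, how many of their reports hit a banned user
--     count = {}
--     for reported, users in reporters.items():
--         if len(users) >= k:
--             for u in users:
--                 count[u] = count.get(u, 0) + 1
--     return [count.get(i, 0) for i in id_list]
-- ===== Notes on version B (the rewrite author's own statement) =====
-- stated objective: alternative
-- what changed: B inverts the aggregation: instead of A's per-reporter report lists plus a range-indexed loop testing the threshold on every single report, B groups the deduped reports by reported user, walks only the groups of banned users (size >= k) incrementing each reporter's count once per banned group, and reads the results back with a comprehension over id_list.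
import Mathlib
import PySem

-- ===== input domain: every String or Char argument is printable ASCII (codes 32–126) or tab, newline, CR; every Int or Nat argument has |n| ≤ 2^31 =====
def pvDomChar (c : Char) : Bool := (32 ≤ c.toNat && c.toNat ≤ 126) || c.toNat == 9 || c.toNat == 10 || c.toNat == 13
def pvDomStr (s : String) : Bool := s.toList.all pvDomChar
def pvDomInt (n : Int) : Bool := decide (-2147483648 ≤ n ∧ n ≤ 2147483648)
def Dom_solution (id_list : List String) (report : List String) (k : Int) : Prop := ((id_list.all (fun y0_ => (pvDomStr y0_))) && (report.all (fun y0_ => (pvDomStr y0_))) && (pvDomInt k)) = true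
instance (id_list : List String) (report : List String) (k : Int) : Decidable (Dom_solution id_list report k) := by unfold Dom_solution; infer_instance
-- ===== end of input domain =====

-- B groups the deduped reports by reported user and only walks the banned groups,
-- instead of A's per-reporter report lists with a threshold test on every report (objective: alternative).

-- ===== PORT A =====
def solution (id_list : List String) (report : List String) (k : Int) : List Int :=
  -- report = list(set(report)) — consumed only for order-independent counts
  let report' := PySem.Set.ofList report
  -- id_dict = {id: [] for id in id_list};  sin_dict = {id: 0 for id in id_list}
  let id_dict : PySem.Dict String (List String) :=
    id_list.foldl (fun d id => d.insert id []) PySem.Dict.empty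
  let sin_dict : PySem.Dict String Int :=
    id_list.foldl (fun d id => d.insert id 0) PySem.Dict.empty
  -- for r in report: user, sin = r.split(); id_dict[user].append(sin); sin_dict[sin] += 1
  let st := report'.foldl
    (fun (st : PySem.Dict String (List String) × PySem.Dict String Int) r =>
      match PySem.Str.split₀ r with
      | [user, sin] => (st.1.modify user [] (· ++ [sin]), st.2.modify sin 0 (· + 1))
      | _ => st)  -- 'user, sin = r.split()' raises ValueError otherwise (outside Pre_); KeyError cases are outside Pre_ too
    (id_dict, sin_dict)
  -- answer = [0 ...]; for i in range(len(id_list)): for iv in id_dict[id_list[i]]: if sin_dict[iv] >= k: answer[i] += 1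
  (PySem.List.pyRange 0 (id_list.length : Int) 1).foldl
    (fun answer i =>
      (st.1.getD (PySem.List.pyGetD id_list i "") []).foldl
        (fun answer iv =>
          if st.2.getD iv 0 ≥ k then
            PySem.List.pySetD answer i (PySem.List.pyGetD answer i 0 + 1)
          else answer)
        answer)
    (List.replicate id_list.length 0)

-- ===== PORT B =====
def solution_alt (id_list : List String) (report : List String) (k : Int) : List Int :=
  -- reporters: reported user -> list of reporters, over the deduped reports
  let reporters := (PySem.Set.ofList report).foldl
    (fun (d : PySem.Dict String (List String)) r =>
      -- parts = r.split(); reporters.setdefault(parts[1], []).append(parts[0])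
      -- (getD is total: Pre_ guarantees both indexes exist, where Python would raise IndexError)
      d.modify ((PySem.Str.split₀ r).getD 1 "") [] (· ++ [(PySem.Str.split₀ r).getD 0 ""]))
    PySem.Dict.empty
  -- count[u] += 1 for every reporter u of every banned user
  let count := reporters.items.foldl
    (fun (c : PySem.Dict String Int) p =>
      if (p.2.length : Int) ≥ k then
        p.2.foldl (fun c u => c.insert u (c.getD u 0 + 1)) c
      else c)
    PySem.Dict.empty
  id_list.map (fun id => count.getD id 0)

-- ===== PRECONDITION & SPEC =====
-- Pre_ := exactly the inputs where Python A returns: every report splits into exactly two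
-- whitespace-separated words and both words occur in id_list (else A raises ValueError/KeyError).
def Pre_solution (id_list : List String) (report : List String) (k : Int) : Prop :=
  ∀ r ∈ report, (PySem.Str.split₀ r).length = 2 ∧
    (PySem.Str.split₀ r).getD 0 "" ∈ id_list ∧ (PySem.Str.split₀ r).getD 1 "" ∈ id_list
instance (id_list : List String) (report : List String) (k : Int) : Decidable (Pre_solution id_list report k) := by unfold Pre_solution; infer_instance
def pvWitness_solution : List String × List String × Int := (["a", "b"], ["a b", "b a", "b b"], 2)

def Spec_solution (id_list : List String) (report : List String) (k : Int) (out : List Int) : Prop := out = solution_alt id_list report k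
instance (id_list : List String) (report : List String) (k : Int) (out : List Int) : Decidable (Spec_solution id_list report k out) := by unfold Spec_solution; infer_instance

-- ===== CLAIM (what is proved, stated in full; the proofs are below) =====
def Claim_equal_solution : Prop := ∀ (id_list : List String) (report : List String) (k : Int), Dom_solution id_list report k → Pre_solution id_list report k → Spec_solution id_list report k (solution id_list report k)
-- ===== LEMMAS AND PROOFS =====

-- parse "user sin" into its two words (proof-side view of 'r.split()')
def pvParse (r : String) : String × String :=
  ((PySem.Str.split₀ r).getD 0 "", (PySem.Str.split₀ r).getD 1 "")

theorem pvParse_split (r : String) (h : (PySem.Str.split₀ r).length = 2) :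
    PySem.Str.split₀ r = [(pvParse r).1, (pvParse r).2] := by
  match hl : PySem.Str.split₀ r with
  | [u, s] => simp [pvParse, hl]
  | [] | [_] | _ :: _ :: _ :: _ => simp [hl] at h

-- A's report loop, rewritten over the parsed pairs
theorem a_fold_eq (l : List String) (h : ∀ r ∈ l, (PySem.Str.split₀ r).length = 2)
    (st0 : PySem.Dict String (List String) × PySem.Dict String Int) :
    l.foldl
      (fun st r =>
        match PySem.Str.split₀ r with
        | [user, sin] => (st.1.modify user [] (· ++ [sin]), st.2.modify sin 0 (· + 1))
        | _ => st) st0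
    = (l.map pvParse).foldl
        (fun st p => (st.1.modify p.1 [] (· ++ [p.2]), st.2.modify p.2 0 (· + 1))) st0 := by
  induction l generalizing st0 with
  | nil => rfl
  | cons r t ih =>
    have hs := pvParse_split r (h r (by simp))
    simp only [List.foldl_cons, List.map_cons, hs]
    exact ih (fun r hr => h r (by simp [hr])) _

-- B's report loop, rewritten over the parsed pairs
theorem b_fold_eq (l : List String) (d0 : PySem.Dict String (List String)) :
    l.foldl
      (fun d r => d.modify ((PySem.Str.split₀ r).getD 1 "") [] (· ++ [(PySem.Str.split₀ r).getD 0 ""])) d0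
    = (l.map pvParse).foldl (fun d p => d.modify p.2 [] (· ++ [p.1])) d0 :=
  (List.foldl_map (f := pvParse) (g := fun d p => d.modify p.2 [] (· ++ [p.1]))
    (l := l) (init := d0)).symm

-- a dict built by inserting the same constant everywhere reads back that constant
theorem getD_foldl_insert_const {ν : Type} (xs : List String) (c : ν) :
    ∀ (d : PySem.Dict String ν), (∀ s, d.getD s c = c) →
    ∀ s, (xs.foldl (fun d id => d.insert id c) d).getD s c = c := by
  induction xs with
  | nil => intro d hd s; exact hd s
  | cons x t ih =>
    intro d hd s
    refine ih _ (fun s' => ?_) s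
    rw [PySem.Dict.getD_insert]
    split
    · rfl
    · exact hd s'

theorem set_getD_eq (l : List Int) (i : Nat) (v : Int) (h : i < l.length) :
    (l.set i v).getD i 0 = v := by
  rw [List.getD_eq_getElem _ 0 (by simpa using h)]; simp

theorem set_getD_ne (l : List Int) (i j : Nat) (v : Int) (h : j ≠ i) :
    (l.set i v).getD j 0 = l.getD j 0 := by
  simp [List.getD, List.getElem?_set_ne (by omega : i ≠ j)]

-- A's inner loop: repeated answer[i] += 1 is one write of the count
theorem inner_loop (P : String → Prop) [DecidablePred P] (l : List String) :
    ∀ (ans : List Int) (i : Nat), i < ans.length →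
      l.foldl
        (fun ans iv =>
          if P iv then
            PySem.List.pySetD ans (i : Int) (PySem.List.pyGetD ans (i : Int) 0 + 1)
          else ans) ans
      = ans.set i (ans.getD i 0 + (l.countP (fun iv => decide (P iv)) : Int)) := by
  induction l with
  | nil =>
    intro ans i hi
    simp only [List.foldl_nil, List.countP_nil, Nat.cast_zero, add_zero]
    rw [List.getD_eq_getElem _ 0 hi]
    exact (List.set_getElem_self hi).symm
  | cons x t ih =>
    intro ans i hi
    by_cases hc : P x
    · rw [List.foldl_cons, if_pos hc, PySem.List.pyGetD_natCast ans i 0,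
        PySem.List.pySetD_natCast ans i]
      rw [ih (ans.set i (ans.getD i 0 + 1)) i (by simpa using hi)]
      rw [List.set_set, set_getD_eq ans i _ hi,
        List.countP_cons_of_pos (p := fun iv => decide (P iv)) (by simp [hc])]
      congr 1
      push_cast
      ring
    · rw [List.foldl_cons, if_neg hc, ih ans i hi,
        List.countP_cons_of_neg (p := fun iv => decide (P iv)) (by simp [hc])]

theorem outer_loop (F : List Int → Int → List Int) (n : Nat) (e : Nat → Int)
    (hF : ∀ (ans : List Int) (j : Nat), ans.length = n → j < n →
        F ans (j : Int) = ans.set j (ans.getD j 0 + e j)) :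
    ∀ (m c : Nat), n - c = m → ∀ (ans : List Int), ans.length = n →
      ((PySem.List.pyRange (c : Int) (n : Int) 1).foldl F ans).length = n ∧
      ∀ j : Nat, j < n →
        ((PySem.List.pyRange (c : Int) (n : Int) 1).foldl F ans).getD j 0 =
          if c ≤ j then ans.getD j 0 + e j else ans.getD j 0 := by
  intro m
  induction m with
  | zero =>
    intro c hc ans hans
    rw [PySem.List.pyRange_one_eq_nil (by omega : (n : Int) ≤ (c : Int))]
    refine ⟨hans, fun j hj => ?_⟩
    rw [if_neg (by omega)]; rfl
  | succ m ih =>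
    intro c hc ans hans
    rw [PySem.List.pyRange_one_cons (by omega : (c : Int) < (n : Int))]
    rw [List.foldl_cons, hF ans c hans (by omega)]
    have hlen : (ans.set c (ans.getD c 0 + e c)).length = n := by simpa using hans
    have hcast : ((c : Int) + 1) = ((c + 1 : Nat) : Int) := by push_cast; ring
    rw [hcast]
    obtain ⟨hl, hg⟩ := ih (c + 1) (by omega) _ hlen
    refine ⟨hl, fun j hj => ?_⟩
    rw [hg j hj]
    by_cases hcj : c + 1 ≤ j
    · rw [if_pos hcj, if_pos (by omega), set_getD_ne ans c j _ (by omega)]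
    · by_cases hjc : j = c
      · subst hjc
        rw [if_neg hcj, if_pos le_rfl, set_getD_eq ans j _ (by omega)]
      · rw [if_neg hcj, if_neg (by omega), set_getD_ne ans c j _ hjc]

-- A's whole answer construction, for arbitrary dicts in place of id_dict/sin_dict after the report loop
theorem a_answer (D1 : PySem.Dict String (List String)) (D2 : PySem.Dict String Int)
    (k : Int) (id_list : List String) :
    (PySem.List.pyRange 0 (id_list.length : Int) 1).foldl
      (fun answer i =>
        (D1.getD (PySem.List.pyGetD id_list i "") []).foldl
          (fun answer iv =>
            if D2.getD iv 0 ≥ k then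
              PySem.List.pySetD answer i (PySem.List.pyGetD answer i 0 + 1)
            else answer)
          answer)
      (List.replicate id_list.length 0)
    = (List.range id_list.length).map
        (fun j => ((D1.getD (id_list.getD j "") []).countP
            (fun iv => decide (D2.getD iv 0 ≥ k)) : Int)) := by
  have hF : ∀ (ans : List Int) (j : Nat), ans.length = id_list.length → j < id_list.length →
      (fun answer i =>
        (D1.getD (PySem.List.pyGetD id_list i "") []).foldl
          (fun answer iv =>
            if D2.getD iv 0 ≥ k then
              PySem.List.pySetD answer i (PySem.List.pyGetD answer i 0 + 1)
            else answer)
          answer) ans (j : Int)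
      = ans.set j (ans.getD j 0 +
          ((D1.getD (id_list.getD j "") []).countP (fun iv => decide (D2.getD iv 0 ≥ k)) : Int)) := by
    intro ans j hlen hj
    simp only
    rw [PySem.List.pyGetD_natCast id_list j ""]
    exact inner_loop (fun iv => D2.getD iv 0 ≥ k) _ ans j (by omega)
  obtain ⟨hlen, hget⟩ := outer_loop
    (fun answer i =>
        (D1.getD (PySem.List.pyGetD id_list i "") []).foldl
          (fun answer iv =>
            if D2.getD iv 0 ≥ k then
              PySem.List.pySetD answer i (PySem.List.pyGetD answer i 0 + 1)
            else answer)
          answer)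
    id_list.length
    (fun j => ((D1.getD (id_list.getD j "") []).countP
        (fun iv => decide (D2.getD iv 0 ≥ k)) : Int))
    hF id_list.length 0 (by omega)
    (List.replicate id_list.length 0) (by simp)
  rw [show ((0 : Nat) : Int) = 0 by simp] at hlen hget
  apply List.ext_getElem (by simp [hlen])
  intro j h1 h2
  rw [← List.getD_eq_getElem _ 0 h1, ← List.getD_eq_getElem _ 0 h2]
  rw [hget j (by omega)]
  rw [if_pos (by omega), List.getD_replicate _ (by omega), zero_add]
  rw [List.getD_eq_getElem _ 0 h2, List.getElem_map, List.getElem_range]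

theorem sum_indicator (S : List String) (a : String) :
    (S.map (fun s => if a == s then (1 : Nat) else 0)).sum = S.count a := by
  induction S with
  | nil => rfl
  | cons x t ih =>
    simp only [List.map_cons, List.sum_cons, ih, List.count_cons]
    by_cases hx : a = x
    · simp [hx, Nat.add_comm]
    · simp [hx, Ne.symm hx, beq_iff_eq]

-- grouping by second component partitions the pairs
theorem partition_countP (q : String × String → Bool) (S : List String)
    (hnd : S.Nodup) :
    ∀ (pairs : List (String × String)), (∀ p ∈ pairs, p.2 ∈ S) →
    (S.map (fun s => pairs.countP (fun p => p.2 == s && q p))).sum = pairs.countP q := by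
  intro pairs
  induction pairs with
  | nil => simp
  | cons p t ih =>
    intro hmem
    have hm : p.2 ∈ S := hmem p (by simp)
    have hrec := ih (fun p' hp' => hmem p' (List.mem_cons_of_mem _ hp'))
    rw [show (fun s => List.countP (fun p' => p'.2 == s && q p') (p :: t))
        = fun s => List.countP (fun p' => p'.2 == s && q p') t
            + (if p.2 == s && q p then 1 else 0) from funext fun s => by
          rw [List.countP_cons]]
    rw [List.sum_map_add, hrec, List.countP_cons]
    congr 1
    by_cases hq : q p
    · simp only [hq, Bool.and_true]
      rw [sum_indicator S p.2, List.count_eq_one_of_mem hnd hm]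
      simp
    · simp [hq]

-- B's counting loop over the grouped items
theorem count_fold (k : Int) (u : String) :
    ∀ (items : List (String × List String)) (c : PySem.Dict String Int),
      (items.foldl
        (fun c p =>
          if (p.2.length : Int) ≥ k then
            p.2.foldl (fun c u => c.insert u (c.getD u 0 + 1)) c
          else c) c).getD u 0
      = c.getD u 0 +
        (items.map (fun p => if (p.2.length : Int) ≥ k then (p.2.count u : Int) else 0)).sum := by
  intro items
  induction items with
  | nil => simp
  | cons p t ih =>
    intro c
    rw [List.foldl_cons, List.map_cons, List.sum_cons]
    by_cases hk : (p.2.length : Int) ≥ k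
    · rw [if_pos hk, ih, PySem.Dict.getD_foldl_insert_add_one, if_pos hk]
      ring
    · rw [if_neg hk, ih, if_neg hk]
      ring

-- the per-banned-user term of B equals a single countP over the pairs
theorem term_eq (k : Int) (u s : String) (pairs : List (String × String)) :
    (if ((((pairs.filter (fun p => p.2 == s)).map (fun p => p.1)).length : Nat) : Int) ≥ k
      then (((pairs.filter (fun p => p.2 == s)).map (fun p => p.1)).count u : Int) else 0)
    = ((pairs.countP (fun p => p.2 == s &&
        (decide (((pairs.map Prod.snd).count p.2 : Int) ≥ k) && (p.1 == u)))) : Int) := by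
  have hlen : ((pairs.filter (fun p => p.2 == s)).map (fun p => p.1)).length
      = (pairs.map Prod.snd).count s := by
    rw [List.length_map, ← List.countP_eq_length_filter, List.count_eq_countP, List.countP_map]
    rfl
  by_cases hk : (((pairs.map Prod.snd).count s : Nat) : Int) ≥ k
  · rw [if_pos (by rw [hlen]; exact hk)]
    congr 1
    rw [List.count_eq_countP, List.countP_map, List.countP_filter]
    refine List.countP_congr (fun p _ => ?_)
    by_cases hps : p.2 = s
    · subst hps
      simp [hk, Bool.and_comm]
    · simp [hps]
  · rw [if_neg (by rw [hlen]; exact hk)]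
    symm
    norm_cast
    rw [List.countP_eq_zero]
    intro p _ hp
    simp only [Bool.and_eq_true, beq_iff_eq, decide_eq_true_eq] at hp
    exact hk (hp.1 ▸ hp.2.1)

-- ===== VERDICT (by name: the statement is the Claim_ definition above) =====
theorem solution_spec : Claim_equal_solution := by
  intro id_list report k _ hPre
  unfold Spec_solution
  have hsplitL : ∀ r ∈ PySem.Set.ofList report, (PySem.Str.split₀ r).length = 2 :=
    fun r hr => (hPre r ((PySem.Set.mem_ofList report r).mp hr)).1
  simp only [solution, solution_alt]
  rw [a_fold_eq _ hsplitL, b_fold_eq]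
  have hsteq :
      (List.map pvParse (PySem.Set.ofList report)).foldl
        (fun st p => (st.1.modify p.1 [] (· ++ [p.2]), st.2.modify p.2 0 (· + 1)))
        (id_list.foldl (fun d id => d.insert id ([] : List String)) PySem.Dict.empty,
         id_list.foldl (fun d id => d.insert id (0 : Int)) PySem.Dict.empty)
    = ((List.map pvParse (PySem.Set.ofList report)).foldl (fun d p => d.modify p.1 [] (· ++ [p.2]))
         (id_list.foldl (fun d id => d.insert id ([] : List String)) PySem.Dict.empty),
       (List.map pvParse (PySem.Set.ofList report)).foldl (fun d p => d.modify p.2 0 (· + 1))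
         (id_list.foldl (fun d id => d.insert id (0 : Int)) PySem.Dict.empty)) :=
    PySem.List.foldl_prod_mk
      (fun (d : PySem.Dict String (List String)) (p : String × String) => d.modify p.1 [] (· ++ [p.2]))
      (fun (d : PySem.Dict String Int) (p : String × String) => d.modify p.2 0 (· + 1)) _ _ _
  rw [hsteq]
  dsimp only
  rw [a_answer]
  set pairs := List.map pvParse (PySem.Set.ofList report) with hpairsdef
  set id0 := List.foldl (fun d id => d.insert id ([] : List String)) PySem.Dict.empty id_list with hid0def
  set sd0 := List.foldl (fun d id => d.insert id (0 : Int)) PySem.Dict.empty id_list with hsd0def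
  set A1 := List.foldl (fun d p => d.modify p.1 [] (· ++ [p.2])) id0 pairs with hA1def
  set A2 := List.foldl (fun d p => d.modify p.2 0 (· + 1)) sd0 pairs with hA2def
  set RP := List.foldl (fun d p => d.modify p.2 [] (· ++ [p.1])) PySem.Dict.empty pairs with hRPdef
  set BC := List.foldl
      (fun (c : PySem.Dict String Int) p => if (p.2.length : Int) ≥ k then List.foldl (fun c u => c.insert u (c.getD u 0 + 1)) c p.2 else c)
      PySem.Dict.empty RP.items with hBCdef
  have hid0v : ∀ s, id0.getD s [] = [] := by
    rw [hid0def]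
    exact getD_foldl_insert_const id_list [] PySem.Dict.empty (fun s => PySem.Dict.getD_empty s [])
  have hsd0v : ∀ s, sd0.getD s 0 = 0 := by
    rw [hsd0def]
    exact getD_foldl_insert_const id_list 0 PySem.Dict.empty (fun s => PySem.Dict.getD_empty s 0)
  have hAd : ∀ u, A1.getD u [] = (pairs.filter (fun p => p.1 == u)).map (fun p => p.2) := by
    intro u
    rw [hA1def, PySem.Dict.getD_foldl_modify_append, hid0v u, List.nil_append]
  have hAc : ∀ s, A2.getD s 0 = (((pairs.map Prod.snd).count s : Nat) : Int) := by
    intro s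
    have h1 : (pairs.map Prod.snd).foldl (fun d x => d.modify x 0 (· + 1)) sd0
        = pairs.foldl (fun d p => d.modify p.2 0 (· + 1)) sd0 := List.foldl_map
    rw [hA2def, ← h1, PySem.Dict.getD_foldl_modify_add_one, hsd0v s, zero_add]
  have hswap : RP = List.foldl (fun d p => d.modify p.1 [] (· ++ [p.2])) PySem.Dict.empty (pairs.map Prod.swap) := by
    have h1 : (pairs.map Prod.swap).foldl (fun d p => d.modify p.1 [] (· ++ [p.2])) PySem.Dict.empty
        = pairs.foldl (fun d p => d.modify p.2 [] (· ++ [p.1])) PySem.Dict.empty := List.foldl_map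
    rw [hRPdef, ← h1]
  have hgr : ∀ s, RP.getD s [] = (pairs.filter (fun p => p.2 == s)).map (fun p => p.1) := by
    intro s
    rw [hswap, PySem.Dict.getD_foldl_modify_append, PySem.Dict.getD_empty, List.nil_append,
      List.filter_map, List.map_map]
    simp [Function.comp_def]
  have hkeys : RP.keys = PySem.Set.ofList (pairs.map Prod.snd) := by
    have h2 : RP.keys = PySem.Set.update (PySem.Dict.empty : PySem.Dict String (List String)).keys (pairs.map (fun p => p.2)) := by
      rw [hRPdef]
      exact PySem.Dict.keys_foldl_modify_key pairs (fun p => p.2) [] (fun d p l => l ++ [p.1]) PySem.Dict.empty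
    rw [h2, PySem.Dict.keys_empty, PySem.Set.ofList_eq_foldl]
    rfl
  have hnd : RP.keys.Nodup := by rw [hkeys]; exact PySem.Set.nodup_ofList _
  have hitems : RP.items = (PySem.Set.ofList (pairs.map Prod.snd)).map
      (fun s => (s, (pairs.filter (fun p => p.2 == s)).map (fun p => p.1))) := by
    rw [PySem.Dict.items_eq_map_keys RP hnd ([] : List String), hkeys]
    exact List.map_congr_left (fun s _ => by rw [hgr s])
  have hBc : ∀ u, BC.getD u 0 =
      ((pairs.countP (fun p => decide (((pairs.map Prod.snd).count p.2 : Int) ≥ k) && (p.1 == u)) : Nat) : Int) := by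
    intro u
    have hmaps : (RP.items.map (fun p => if ((p.2.length : Nat) : Int) ≥ k then ((p.2.count u : Nat) : Int) else 0))
        = (PySem.Set.ofList (pairs.map Prod.snd)).map (fun s => ((pairs.countP (fun p => p.2 == s &&
            (decide (((pairs.map Prod.snd).count p.2 : Int) ≥ k) && (p.1 == u))) : Nat) : Int)) := by
      rw [hitems]
      refine (List.map_map).trans (List.map_congr_left (fun s _ => ?_))
      dsimp only [Function.comp_apply]
      exact term_eq k u s pairs
    have hcast : ((PySem.Set.ofList (pairs.map Prod.snd)).map (fun s => ((pairs.countP (fun p => p.2 == s &&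
            (decide (((pairs.map Prod.snd).count p.2 : Int) ≥ k) && (p.1 == u))) : Nat) : Int))).sum
        = ((((PySem.Set.ofList (pairs.map Prod.snd)).map (fun s => pairs.countP (fun p => p.2 == s &&
            (decide (((pairs.map Prod.snd).count p.2 : Int) ≥ k) && (p.1 == u))))).sum : Nat) : Int) := by
      rw [Nat.cast_list_sum]
      exact congrArg List.sum (List.map_map).symm
    rw [hBCdef, count_fold k u, PySem.Dict.getD_empty, zero_add, hmaps, hcast,
      partition_countP _ _ (PySem.Set.nodup_ofList _) pairs
        (fun p hp => (PySem.Set.mem_ofList _ _).mpr (List.mem_map_of_mem hp))]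
  apply List.ext_getElem (by simp)
  intro j h1 h2
  have hj : j < id_list.length := by simpa using h2
  simp only [List.getElem_map, List.getElem_range]
  rw [List.getD_eq_getElem id_list "" hj]
  rw [hAd, hBc]
  rw [List.countP_map, List.countP_filter]
  norm_cast
  refine List.countP_congr (fun p _ => ?_)
  simp [hAc]
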